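-- pv_equiv track=rewrite | github.com/eider1939/Ciencia_de_Datos_Aplicada | Data-ingestion_Clusters-report/prueba.py | join_text
-- ===== SOURCE A (Python) =====
-- def join_text(data_sin_espacios):
--     cont_index=0
--     list_index_pop=[]
--     for j in range(0,len(data_sin_espacios)):
--         if len(data_sin_espacios[j])>1:
--             cont_index=j
--         elif len(data_sin_espacios[j])==1:
--             list_index_pop.append(j)
--             texto=data_sin_espacios[cont_index][3]
--             data_sin_espacios[cont_index][3]=str(texto)+' '+str(data_sin_espacios[j][0])
--     return data_sin_espacios,list_index_pop
-- ===== SOURCE B (Python) =====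
-- def join_text(data_sin_espacios):
--     # One grouping pass, then a single join per leader (instead of repeated string re-concatenation).
--     leader = 0
--     children = {}
--     list_index_pop = []
--     for j, row in enumerate(data_sin_espacios):
--         if len(row) > 1:
--             leader = j
--         elif len(row) == 1:
--             list_index_pop.append(j)
--             children.setdefault(leader, []).append(j)
--     for L, idxs in children.items():
--         data_sin_espacios[L][3] = ' '.join(
--             [str(data_sin_espacios[L][3])] + [str(data_sin_espacios[j][0]) for j in idxs])
--     return data_sin_espacios, list_index_pop
-- ===== Notes on version B (the rewrite author's own statement) =====
-- stated objective: alternative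
-- what changed: A accumulates each single row's text into its leader row one string re-concatenation at a time inside its single index loop; B instead builds a leader->children index in one grouping pass and then performs a single ' '.join per leader in a second pass.
import Mathlib
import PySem

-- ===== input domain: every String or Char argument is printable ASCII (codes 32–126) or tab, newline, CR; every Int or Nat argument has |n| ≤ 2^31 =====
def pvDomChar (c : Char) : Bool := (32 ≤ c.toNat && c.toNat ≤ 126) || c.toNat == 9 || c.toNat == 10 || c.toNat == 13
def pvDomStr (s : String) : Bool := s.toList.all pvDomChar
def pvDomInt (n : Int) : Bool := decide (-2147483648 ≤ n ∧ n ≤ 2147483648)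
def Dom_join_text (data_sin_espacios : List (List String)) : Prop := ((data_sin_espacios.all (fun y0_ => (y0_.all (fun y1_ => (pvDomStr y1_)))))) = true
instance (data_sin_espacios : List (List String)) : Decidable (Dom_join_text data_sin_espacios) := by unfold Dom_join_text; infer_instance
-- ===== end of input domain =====

-- B replaces A's per-child string re-concatenation into the leader row by one grouping
-- pass (leader -> list of single-row indices) followed by a single ' '.join per leader.
-- A mutates its argument in place; the equivalence proved here is about the RETURN value only
-- (B performs the same mutation in Python).

-- ===== PORT A =====
-- loop body of A's single for-loop over range(0, len(data))
def pvStepA (st : Int × List Int × List (List String)) (j : Int) :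
    Int × List Int × List (List String) :=
  let row := PySem.List.pyGetD st.2.2 j []
  if 1 < row.length then (j, st.2.1, st.2.2)
  else if row.length = 1 then
    let lrow := PySem.List.pyGetD st.2.2 st.1 []
    let texto := PySem.List.pyGetD lrow 3 ""
    (st.1, st.2.1 ++ [j],
      PySem.List.pySetD st.2.2 st.1
        (PySem.List.pySetD lrow 3 (texto ++ " " ++ PySem.List.pyGetD row 0 "")))
  else st

def join_text (data_sin_espacios : List (List String)) : List (List String) × List Int :=
  let st := (PySem.List.pyRange 0 (PySem.List.len data_sin_espacios) 1).foldl
    pvStepA (0, [], data_sin_espacios)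
  (st.2.2, st.2.1)

-- ===== PORT B =====
-- first pass: track the current leader, collect pops and the leader -> children map
def pvStepB1 (st : Int × PySem.Dict Int (List Int) × List Int) (p : Int × List String) :
    Int × PySem.Dict Int (List Int) × List Int :=
  if 1 < p.2.length then (p.1, st.2.1, st.2.2)
  else if p.2.length = 1 then
    (st.1, PySem.Dict.modify st.2.1 st.1 [] (fun l => l ++ [p.1]), st.2.2 ++ [p.1])
  else st

-- second pass: one join per leader that has children
def pvStepB2 (d : List (List String)) (pr : Int × List Int) : List (List String) :=
  let row := PySem.List.pyGetD d pr.1 []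
  PySem.List.pySetD d pr.1
    (PySem.List.pySetD row 3
      (PySem.Str.join " "
        (PySem.List.pyGetD row 3 "" ::
          pr.2.map (fun q => PySem.List.pyGetD (PySem.List.pyGetD d q []) 0 ""))))

def join_text_alt (data_sin_espacios : List (List String)) : List (List String) × List Int :=
  let st := (PySem.List.enumerate data_sin_espacios).foldl
    pvStepB1 (0, PySem.Dict.empty, [])
  (st.2.1.items.foldl pvStepB2 data_sin_espacios, st.2.2)

-- ===== PRECONDITION & SPEC =====
-- Pre_ excludes exactly the inputs on which A raises IndexError: some single-element row
-- whose current leader row (the default row 0 for leading singles, or a multi-element row of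
-- length 2 or 3) has no element at index 3.
def Pre_join_text (data_sin_espacios : List (List String)) : Prop :=
  ∀ j < data_sin_espacios.length, (data_sin_espacios.getD j []).length = 1 →
    ∃ i < j, 4 ≤ (data_sin_espacios.getD i []).length ∧
      ∀ k < j, i < k → (data_sin_espacios.getD k []).length ≤ 1

instance (data_sin_espacios : List (List String)) : Decidable (Pre_join_text data_sin_espacios) := by
  unfold Pre_join_text; infer_instance

def pvWitness_join_text : List (List String) := [["a", "b", "c", "t"], ["x"], [], ["y"]]

def Spec_join_text (data_sin_espacios : List (List String)) (out : List (List String) × List Int) : Prop := out = join_text_alt data_sin_espacios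
instance (data_sin_espacios : List (List String)) (out : List (List String) × List Int) : Decidable (Spec_join_text data_sin_espacios out) := by unfold Spec_join_text; infer_instance

-- ===== CLAIM (what is proved, stated in full; the proofs are below) =====
def Claim_equal_join_text : Prop := ∀ (data_sin_espacios : List (List String)), Dom_join_text data_sin_espacios → Pre_join_text data_sin_espacios → Spec_join_text data_sin_espacios (join_text data_sin_espacios)

-- ===== LEMMAS AND PROOFS =====

-- A's loop re-indexed over Nat prefixes
def pvStA (data : List (List String)) : Nat → Int × List Int × List (List String)
  | 0 => (0, [], data)
  | n + 1 => pvStepA (pvStA data n) n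

-- B's first pass re-indexed over Nat prefixes
def pvStB (data : List (List String)) : Nat → Int × PySem.Dict Int (List Int) × List Int
  | 0 => (0, PySem.Dict.empty, [])
  | n + 1 => pvStepB1 (pvStB data n) (n, data.getD n [])

theorem pvStA_eq (data : List (List String)) (n : Nat) :
    (List.range n).foldl (fun s (k : Nat) => pvStepA s ((0 : Int) + (k : Int))) (0, [], data) = pvStA data n := by
  induction n with
  | zero => rfl
  | succ n ih => rw [List.range_succ, List.foldl_append, ih]; simp [pvStA]

theorem join_text_eq (data : List (List String)) :
    join_text data = ((pvStA data data.length).2.2, (pvStA data data.length).2.1) := by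
  unfold join_text
  rw [show PySem.List.len data = (data.length : Int) from rfl, PySem.List.pyRange_one,
    List.foldl_map]
  simp only [Int.sub_zero, Int.toNat_natCast]
  rw [pvStA_eq]

theorem pvStB_eq (data : List (List String)) (n : Nat) :
    (List.range n).foldl
      (fun s (k : Nat) => pvStepB1 s ((0 : Int) + (k : Int), PySem.List.pyGetD data ((0 : Int) + (k : Int)) []))
      (0, PySem.Dict.empty, []) = pvStB data n := by
  induction n with
  | zero => rfl
  | succ n ih =>
    rw [List.range_succ, List.foldl_append, ih]
    simp [pvStB, PySem.List.pyGetD_natCast]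

theorem join_text_alt_eq (data : List (List String)) :
    join_text_alt data =
      ((pvStB data data.length).2.1.items.foldl pvStepB2 data, (pvStB data data.length).2.2) := by
  unfold join_text_alt
  rw [PySem.List.enumerate_eq_map_pyRange data [], List.foldl_map,
    show PySem.List.len data = (data.length : Int) from rfl, PySem.List.pyRange_one,
    List.foldl_map]
  simp only [Int.sub_zero, Int.toNat_natCast]
  rw [pvStB_eq]

-- string join: one more child appended
theorem pvChars_join_snoc (sep a y : List Char) (l : List (List Char)) :
    PySem.Chars.join sep ((a :: l) ++ [y]) = PySem.Chars.join sep (a :: l) ++ sep ++ y := by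
  induction l generalizing a with
  | nil => simp [PySem.Chars.join_cons_cons, PySem.Chars.join_singleton]
  | cons b l ih =>
    simp only [List.cons_append] at ih ⊢
    rw [PySem.Chars.join_cons_cons, ih b, PySem.Chars.join_cons_cons sep a b l]
    simp [List.append_assoc]

theorem pvStr_join_snoc (a y : String) (l : List String) :
    PySem.Str.join " " ((a :: l) ++ [y]) = PySem.Str.join " " (a :: l) ++ " " ++ y := by
  apply String.toList_inj.mp
  simp only [String.toList_append, PySem.Str.toList_join, List.map_append, List.map_cons,
    List.map_nil]
  exact pvChars_join_snoc " ".toList a.toList y.toList (l.map String.toList)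

theorem pvStr_join_single (a : String) :
    PySem.Str.join " " [a] = a := by
  apply String.toList_inj.mp
  simp [PySem.Str.toList_join, PySem.Chars.join_singleton]

-- validity of the children dict w.r.t. a data list (keys: leader rows of length ≥ 4;
-- values: single-element rows)
def pvGoodItems (data : List (List String)) (ps : List (Int × List Int)) : Prop :=
  ∀ p ∈ ps, ∃ K : Nat, p.1 = (K : Int) ∧ K < data.length ∧
    4 ≤ (data.getD K []).length ∧
    ∀ q ∈ p.2, ∃ j : Nat, q = (j : Int) ∧ j < data.length ∧ (data.getD j []).length = 1

theorem pvFoldl_step2_length (ps : List (Int × List Int)) (d : List (List String)) :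
    (ps.foldl pvStepB2 d).length = d.length := by
  induction ps generalizing d with
  | nil => rfl
  | cons p ps ih => simp [List.foldl_cons, ih, pvStepB2, PySem.List.length_pySetD]

-- what B's second pass computes, row by row
theorem pvApply2_char (data : List (List String)) (ps : List (Int × List Int))
    (d : List (List String)) (hlen : d.length = data.length)
    (hrows : ∀ i : Nat, (d.getD i []).length = (data.getD i []).length)
    (hnd : (ps.map Prod.fst).Nodup) (hps : pvGoodItems data ps) (i : Nat) :
    (ps.foldl pvStepB2 d).getD i [] =
      match (PySem.Dict.mk ps).get? (i : Int) with
      | some v => (d.getD i []).set 3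
          (PySem.Str.join " "
            ((d.getD i []).getD 3 "" :: v.map (fun q => (d.getD q.toNat []).getD 0 "")))
      | none => d.getD i [] := by
  induction ps generalizing d i with
  | nil => simp [PySem.Dict.get?]
  | cons p ps ih =>
    obtain ⟨K, hK1, hK2, hK3, hKch⟩ := hps p (List.mem_cons_self ..)
    have hKd : 4 ≤ (d.getD K []).length := by rw [hrows]; exact hK3
    -- the row written for the head pair
    set J : String := PySem.Str.join " "
      ((d.getD K []).getD 3 "" :: p.2.map (fun q => (d.getD q.toNat []).getD 0 "")) with hJ
    have hmapeq : (p.2.map (fun q => PySem.List.pyGetD (PySem.List.pyGetD d q []) 0 "")) =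
        p.2.map (fun q => (d.getD q.toNat []).getD 0 "") := by
      apply List.map_congr_left
      intro q hq
      obtain ⟨j, rfl, _, _⟩ := hKch q hq
      rw [PySem.List.pyGetD_natCast, Int.toNat_natCast]
      exact PySem.List.pyGetD_ofNat' _ 0 ""
    have hstep : pvStepB2 d p = d.set K ((d.getD K []).set 3 J) := by
      simp only [pvStepB2]
      rw [hK1, PySem.List.pyGetD_natCast, hmapeq]
      rw [show ((3 : Int)) = (((3 : Nat)) : Int) from rfl]
      rw [PySem.List.pySetD_natCast, PySem.List.pySetD_natCast, PySem.List.pyGetD_natCast, hJ]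
    set d' := d.set K ((d.getD K []).set 3 J) with hd'
    have hlen' : d'.length = data.length := by simp [hd', hlen]
    have hgd' : ∀ m : Nat, m ≠ K → d'.getD m [] = d.getD m [] := by
      intro m hm
      simp [hd', List.getD, List.getElem?_set_ne (by omega : K ≠ m)]
    have hgK : d'.getD K [] = (d.getD K []).set 3 J := by
      simp [hd', List.getD, hlen ▸ hK2]
    have hrows' : ∀ m : Nat, (d'.getD m []).length = (data.getD m []).length := by
      intro m
      by_cases hm : m = K
      · subst hm; rw [hgK, List.length_set]; exact hrows _
      · rw [hgd' m hm]; exact hrows m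
    have hndt : (ps.map Prod.fst).Nodup := (List.nodup_cons.mp hnd).2
    have hnotmem : p.1 ∉ ps.map Prod.fst := (List.nodup_cons.mp hnd).1
    have hpst : pvGoodItems data ps := fun q hq => hps q (List.mem_cons_of_mem _ hq)
    rw [List.foldl_cons, hstep, ih d' hlen' hrows' hndt hpst i]
    rw [PySem.Dict.get?_mk_cons]
    by_cases hiK : i = K
    · subst hiK
      have hbeq : (p.1 == (i : Int)) = true := by rw [hK1]; simp
      rw [hbeq]
      simp only [if_pos]
      have hnone : (PySem.Dict.mk ps).get? (i : Int) = none := by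
        rw [PySem.Dict.get?_eq_none_iff_not_mem_keys, PySem.Dict.keys_mk]
        rw [hK1] at hnotmem; exact hnotmem
      rw [hnone]
      exact hgK
    · have hne : (p.1 == (i : Int)) = false := by
        rw [hK1]; simp; omega
      rw [hne]
      simp only [Bool.false_eq_true, if_false]
      -- the tail's lookup result: rewrite the d'-reads back to d-reads
      cases hl : (PySem.Dict.mk ps).get? (i : Int) with
      | none => exact hgd' i hiK
      | some v =>
        have hmem : ((i : Int), v) ∈ ps :=
          (PySem.Dict.get?_eq_some_iff_mem_items (PySem.Dict.mk ps) (i : Int) v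
            (by rw [PySem.Dict.keys_mk]; exact hndt)).mp hl
        obtain ⟨K', hK'1, _, _, hK'ch⟩ := hpst _ hmem
        have hiK' : i = K' := by
          have h2 : (i : Int) = (K' : Int) := hK'1
          exact_mod_cast h2
        subst hiK'
        rw [hgd' i hiK]
        have hmap2 : v.map (fun q => (d'.getD q.toNat []).getD 0 "") =
            v.map (fun q => (d.getD q.toNat []).getD 0 "") := by
          apply List.map_congr_left
          intro q hq
          obtain ⟨j, rfl, _, hj1⟩ := hK'ch q hq
          have hjK : j ≠ K := by
            intro h; subst h
            have := hrows j
            omega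
          simp only [Int.toNat_natCast]
          rw [hgd' j hjK]
        change (d.getD i []).set 3 (PySem.Str.join " " ((d.getD i []).getD 3 "" ::
            v.map (fun q => (d'.getD q.toNat []).getD 0 ""))) =
          (d.getD i []).set 3 (PySem.Str.join " " ((d.getD i []).getD 3 "" ::
            v.map (fun q => (d.getD q.toNat []).getD 0 "")))
        rw [hmap2]

-- the current-leader characterisation of B's first component
def pvLdrOk (data : List (List String)) (n : Nat) (L : Int) : Prop :=
  ∃ K : Nat, L = (K : Int) ∧
    ((K < n ∧ 1 < (data.getD K []).length ∧
        ∀ k < n, K < k → (data.getD k []).length ≤ 1) ∨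
      (K = 0 ∧ ∀ k < n, (data.getD k []).length ≤ 1))

-- the joint invariant of the two loops
def pvInv (data : List (List String)) (n : Nat) : Prop :=
  pvStA data n =
    ((pvStB data n).1, (pvStB data n).2.2,
      (pvStB data n).2.1.items.foldl pvStepB2 data)
  ∧ pvLdrOk data n (pvStB data n).1
  ∧ (pvStB data n).2.1.keys.Nodup
  ∧ pvGoodItems data (pvStB data n).2.1.items

theorem pvInv_zero (data : List (List String)) : pvInv data 0 := by
  refine ⟨rfl, ⟨0, rfl, Or.inr ⟨rfl, by omega⟩⟩, ?_, ?_⟩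
  · simp [pvStB, PySem.Dict.empty, PySem.Dict.keys]
  · intro p hp
    simp [pvStB, PySem.Dict.empty] at hp

theorem pvInv_step (data : List (List String)) (n : Nat) (hn : n < data.length)
    (hPre : Pre_join_text data) (h : pvInv data n) : pvInv data (n + 1) := by
  obtain ⟨hEq, hLdr, hNd, hGood⟩ := h
  set sB := pvStB data n with hsB
  set dA := sB.2.1.items.foldl pvStepB2 data with hdA
  have hNdItems : (sB.2.1.items.map Prod.fst).Nodup := hNd
  have hlenA : dA.length = data.length := pvFoldl_step2_length _ _
  have hchar := pvApply2_char data sB.2.1.items data rfl (fun _ => rfl) hNdItems hGood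
  have hmketa : PySem.Dict.mk sB.2.1.items = sB.2.1 := rfl
  rw [hmketa] at hchar
  have hrowsA : ∀ i : Nat, (dA.getD i []).length = (data.getD i []).length := by
    intro i
    rw [hdA, hchar i]
    cases hl : sB.2.1.get? (i : Int) with
    | none => rfl
    | some v => simp
  have hrown : (dA.getD n []).length = (data.getD n []).length := hrowsA n
  have hstepA : pvStA data (n + 1) = pvStepA (pvStA data n) (n : Int) := rfl
  have hstepB : pvStB data (n + 1) = pvStepB1 sB ((n : Int), data.getD n []) := rfl
  by_cases hmulti : 1 < (data.getD n []).length
  · -- row n is a leader row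
    have hA1 : pvStA data (n + 1) = ((n : Int), sB.2.2, dA) := by
      rw [hstepA, hEq]
      simp only [pvStepA]
      rw [PySem.List.pyGetD_natCast,
        if_pos (show 1 < (dA.getD n []).length by rw [hrown]; exact hmulti)]
    have hB1 : pvStB data (n + 1) = ((n : Int), sB.2.1, sB.2.2) := by
      rw [hstepB]
      simp only [pvStepB1]
      rw [if_pos hmulti]
    refine ⟨?_, ⟨n, ?_, Or.inl ⟨by omega, hmulti, by omega⟩⟩, ?_, ?_⟩
    · rw [hA1, hB1]
    · rw [hB1]
    · rw [hB1]; exact hNd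
    · rw [hB1]; exact hGood
  · by_cases hsingle : (data.getD n []).length = 1
    · -- row n is a single row: identify the leader via Pre_
      obtain ⟨i, hi1, hi2, hi3⟩ := hPre n hn hsingle
      obtain ⟨K, hKL, hKcase⟩ := hLdr
      have hKi : K = i := by
        rcases hKcase with ⟨hK1, hK2, hK3⟩ | ⟨hK0, hAll⟩
        · by_cases hlt : K < i
          · have := hK3 i hi1 hlt; omega
          · by_cases hgt : i < K
            · have := hi3 K hK1 hgt; omega
            · omega
        · have := hAll i hi1; omega
      subst hKi
      have hK4 : 4 ≤ (data.getD K []).length := hi2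
      have hKlt : K < data.length := by omega
      have hKmulti : 1 < (data.getD K []).length := by omega
      -- n is not a key of the children dict
      have hnNotKey : sB.2.1.get? (n : Int) = none := by
        cases hl : sB.2.1.get? (n : Int) with
        | none => rfl
        | some v =>
          obtain ⟨K', hK'1, _, hK'3, _⟩ := hGood _
            ((PySem.Dict.get?_eq_some_iff_mem_items _ _ _ hNd).mp hl)
          have hnK' : n = K' := by
            have h2 : (n : Int) = (K' : Int) := hK'1
            exact_mod_cast h2
          rw [← hnK'] at hK'3
          omega
      have hrowdA : dA.getD n [] = data.getD n [] := by
        rw [hdA, hchar n, hnNotKey]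
      -- old children value at the leader
      set v0 : List Int := sB.2.1.getD (K : Int) [] with hv0
      have hv0good : ∀ q ∈ v0, ∃ j : Nat, q = (j : Int) ∧ j < data.length ∧
          (data.getD j []).length = 1 := by
        rw [hv0, PySem.Dict.getD_eq_get?_getD]
        cases hl : sB.2.1.get? (K : Int) with
        | none => simp
        | some w =>
          obtain ⟨K', hK'1, _, _, hch⟩ := hGood _
            ((PySem.Dict.get?_eq_some_iff_mem_items _ _ _ hNd).mp hl)
          simpa using hch
      -- the modified dict
      set ch' := PySem.Dict.modify sB.2.1 (K : Int) [] (fun l => l ++ [(n : Int)]) with hch'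
      have hch'insert : ch' = sB.2.1.insert (K : Int) (v0 ++ [(n : Int)]) := rfl
      have hch'Nd : ch'.keys.Nodup := by
        rw [hch'insert]; exact PySem.Dict.nodup_keys_insert _ _ _ hNd
      have hch'Good : pvGoodItems data ch'.items := by
        intro p hp
        rw [hch'insert] at hp
        rcases (PySem.Dict.mem_items_insert _ _ _ _).mp hp with hnew | ⟨hold, _⟩
        · subst hnew
          refine ⟨K, rfl, hKlt, hK4, ?_⟩
          intro q hq
          rcases List.mem_append.mp hq with hq | hq
          · exact hv0good q hq
          · simp at hq; exact ⟨n, hq, hn, hsingle⟩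
        · exact hGood p hold
      -- B's step
      have hB : pvStB data (n + 1) = (sB.1, ch', sB.2.2 ++ [(n : Int)]) := by
        rw [hstepB]
        simp only [pvStepB1]
        rw [if_neg (by omega), if_pos hsingle, hKL, hch']
      -- the leader row as seen by A
      have hlrow : dA.getD K [] =
          match sB.2.1.get? (K : Int) with
          | some v => (data.getD K []).set 3
              (PySem.Str.join " "
                ((data.getD K []).getD 3 "" :: v.map (fun q => (data.getD q.toNat []).getD 0 "")))
          | none => data.getD K [] := by rw [hdA]; exact hchar K
      -- A's step
      have hA : pvStA data (n + 1) =
          (sB.1, sB.2.2 ++ [(n : Int)],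
            dA.set K ((dA.getD K []).set 3
              ((dA.getD K []).getD 3 "" ++ " " ++ (dA.getD n []).getD 0 ""))) := by
        rw [hstepA, hEq]
        simp only [pvStepA]
        rw [PySem.List.pyGetD_natCast,
          if_neg (show ¬ 1 < (dA.getD n []).length by omega),
          if_pos (show (dA.getD n []).length = 1 by omega), hKL]
        rw [PySem.List.pyGetD_natCast, PySem.List.pySetD_natCast,
          show ((3 : Int)) = (((3 : Nat)) : Int) from rfl, PySem.List.pySetD_natCast]
        rw [PySem.List.pyGetD_natCast]
        simp only [PySem.List.pyGetD_ofNat']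
      -- identify A's new data with B's second pass on the modified dict
      have hchar' := pvApply2_char data ch'.items data rfl (fun _ => rfl) hch'Nd hch'Good
      have hmketa' : PySem.Dict.mk ch'.items = ch' := rfl
      rw [hmketa'] at hchar'
      have hDataEq :
          dA.set K ((dA.getD K []).set 3
            ((dA.getD K []).getD 3 "" ++ " " ++ (dA.getD n []).getD 0 "")) =
          ch'.items.foldl pvStepB2 data := by
        apply List.ext_getElem
        · rw [List.length_set, hlenA, pvFoldl_step2_length]
        · intro m hm1 hm2
          have hmlen : m < data.length := by
            rw [List.length_set, hlenA] at hm1; exact hm1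
          have hgetD : ∀ (xs : List (List String)) (hxs : m < xs.length),
              xs[m]'hxs = xs.getD m [] := by
            intro xs hxs
            rw [List.getD, List.getElem?_eq_getElem hxs]
            rfl
          rw [hgetD _ _, hgetD _ _, hchar' m]
          have hget' : ch'.get? (m : Int) =
              if (m : Int) = (K : Int) then some (v0 ++ [(n : Int)])
              else sB.2.1.get? (m : Int) := by
            rw [hch'insert]; exact PySem.Dict.get?_insert _ _ _ _
          by_cases hmK : m = K
          · subst hmK
            rw [hget', if_pos rfl]
            have hLHS : (dA.set m ((dA.getD m []).set 3
                ((dA.getD m []).getD 3 "" ++ " " ++ (dA.getD n []).getD 0 ""))).getD m [] =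
                (dA.getD m []).set 3
                  ((dA.getD m []).getD 3 "" ++ " " ++ (dA.getD n []).getD 0 "") := by
              rw [List.getD, List.getElem?_set_self (by omega : m < dA.length)]
              rfl
            rw [hLHS, hrowdA]
            cases hl : sB.2.1.get? (m : Int) with
            | none =>
              have hv0nil : v0 = [] := by
                rw [hv0, PySem.Dict.getD_eq_get?_getD, hl]; rfl
              rw [hlrow, hl, hv0nil]
              simp only [List.nil_append, List.map_cons, List.map_nil, Int.toNat_natCast]
              rw [show ((data.getD m []).getD 3 "" :: [(data.getD n []).getD 0 ""]) =
                  ([(data.getD m []).getD 3 ""] ++ [(data.getD n []).getD 0 ""]) from rfl,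
                pvStr_join_snoc, pvStr_join_single]
            | some v =>
              have hvv0 : v0 = v := by
                rw [hv0, PySem.Dict.getD_eq_get?_getD, hl]; rfl
              rw [hlrow, hl, hvv0]
              have hJ3 : ((data.getD m []).set 3
                  (PySem.Str.join " " ((data.getD m []).getD 3 "" ::
                    v.map (fun q => (data.getD q.toNat []).getD 0 "")))).getD 3 "" =
                  PySem.Str.join " " ((data.getD m []).getD 3 "" ::
                    v.map (fun q => (data.getD q.toNat []).getD 0 "")) := by
                rw [List.getD, List.getElem?_set_self (by omega : 3 < (data.getD m []).length)]
                rfl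
              rw [hJ3, List.set_set]
              congr 1
              rw [List.map_append]
              rw [show ((data.getD m []).getD 3 "" ::
                  (v.map (fun q => (data.getD q.toNat []).getD 0 "") ++
                    [(n : Int)].map (fun q => (data.getD q.toNat []).getD 0 ""))) =
                  (((data.getD m []).getD 3 "" ::
                    v.map (fun q => (data.getD q.toNat []).getD 0 "")) ++
                    [((data.getD ((n : Int)).toNat []).getD 0 "")]) from rfl,
                pvStr_join_snoc]
              simp
          · rw [hget', if_neg (by exact_mod_cast hmK)]
            rw [List.getD, List.getElem?_set_ne (show K ≠ m from fun h => hmK h.symm),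
              ← List.getD]
            rw [hdA, hchar m]
      refine ⟨?_, ⟨K, ?_, ?_⟩, ?_, ?_⟩
      · rw [hA, hB, hDataEq]
      · rw [hB]; exact hKL
      · left
        refine ⟨by omega, hKmulti, ?_⟩
        intro k hk1 hk2
        by_cases hkn : k = n
        · subst hkn; omega
        · rcases hKcase with ⟨_, _, hK3⟩ | ⟨hK0, hAll⟩
          · exact hK3 k (by omega) hk2
          · exact hAll k (by omega)
      · rw [hB]; exact hch'Nd
      · rw [hB]; exact hch'Good
    · -- row n is empty: both loops leave their state unchanged
      have hA0 : pvStA data (n + 1) = (sB.1, sB.2.2, dA) := by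
        rw [hstepA, hEq]
        simp only [pvStepA]
        rw [PySem.List.pyGetD_natCast,
          if_neg (show ¬ 1 < (dA.getD n []).length by omega),
          if_neg (show ¬ (dA.getD n []).length = 1 by omega)]
      have hB0 : pvStB data (n + 1) = sB := by
        rw [hstepB]
        simp only [pvStepB1]
        rw [if_neg (by omega), if_neg (by omega)]
      rw [show pvInv data (n + 1) =
          (pvStA data (n + 1) = ((pvStB data (n + 1)).1, (pvStB data (n + 1)).2.2,
            (pvStB data (n + 1)).2.1.items.foldl pvStepB2 data)
          ∧ pvLdrOk data (n + 1) (pvStB data (n + 1)).1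
          ∧ (pvStB data (n + 1)).2.1.keys.Nodup
          ∧ pvGoodItems data (pvStB data (n + 1)).2.1.items) from rfl]
      rw [hA0, hB0]
      refine ⟨hEq ▸ rfl, ?_, hNd, hGood⟩
      obtain ⟨K, hKL, hKcase⟩ := hLdr
      refine ⟨K, hKL, ?_⟩
      rcases hKcase with ⟨h1, h2, h3⟩ | ⟨h1, h2⟩
      · left
        refine ⟨by omega, h2, ?_⟩
        intro k hk1 hk2
        by_cases hkn : k = n
        · subst hkn; omega
        · exact h3 k (by omega) hk2
      · right
        refine ⟨h1, ?_⟩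
        intro k hk
        by_cases hkn : k = n
        · subst hkn; omega
        · exact h2 k (by omega)

theorem pvInv_all (data : List (List String)) (hPre : Pre_join_text data) :
    ∀ n ≤ data.length, pvInv data n := by
  intro n
  induction n with
  | zero => intro _; exact pvInv_zero data
  | succ n ih =>
    intro hn
    exact pvInv_step data n (by omega) hPre (ih (by omega))

-- ===== VERDICT (by name: the statement is the Claim_ definition above) =====
theorem join_text_spec : Claim_equal_join_text := by
  intro data _ hPre
  unfold Spec_join_text
  obtain ⟨hEq, _, _, _⟩ := pvInv_all data hPre data.length (le_refl _)
  rw [join_text_eq, join_text_alt_eq, hEq]
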